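-- pv_equiv track=rewrite | github.com/JohnTitor142/Albion-Party-Maker | utils/helpers.py | export_roster_to_text
-- ===== SOURCE A (Python) =====
-- from typing import List, Dict, Any
--
-- def group_by_category(items: List[Dict[str, Any]], category_field: str = "category") -> Dict[str, List[Dict[str, Any]]]:
--     """
--     Grouper des items par catégorie.
--
--     Args:
--         items: Liste d'items à grouper
--         category_field: Nom du champ catégorie
--
--     Returns:
--         Dictionnaire {catégorie: [items]}
--     """
--     grouped = {}
--     for item in items:
--         category = item.get(category_field, "Autre")
--         if category not in grouped:
--             grouped[category] = []
--         grouped[category].append(item)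
--     return grouped
--
-- def export_roster_to_text(roster: List[Dict[str, Any]]) -> str:
--     """
--     Exporter un roster en format texte (pour Discord).
--
--     Args:
--         roster: Liste des assignations
--
--     Returns:
--         String formatée pour Discord
--     """
--     if not roster:
--         return "Aucune assignation pour le moment."
--
--     # Grouper par catégorie d'arme
--     by_category = group_by_category(roster, "category")
--
--     lines = ["**🗡️ ROSTER ALBION ZERG 🗡️**\n"]
--
--     for category, assignments in sorted(by_category.items()):
--         lines.append(f"\n**{category}** ({len(assignments)})")
--         for assignment in assignments:
--             weapon = assignment.get("weapon_name", "N/A")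
--             username = assignment.get("username", "N/A")
--             lines.append(f"  • {weapon} - {username}")
--
--     lines.append(f"\n**Total: {len(roster)} joueurs**")
--
--     return "\n".join(lines)
-- ===== SOURCE B (Python) =====
-- from typing import List, Dict, Any
--
-- def export_roster_to_text(roster: List[Dict[str, Any]]) -> str:
--     """Exporter un roster en format texte (pour Discord)."""
--     if not roster:
--         return "Aucune assignation pour le moment."
--
--     parts = ["**🗡️ ROSTER ALBION ZERG 🗡️**\n"]
--     categories = sorted({a.get("category", "Autre") for a in roster})
--     for cat in categories:
--         group = [a for a in roster if a.get("category", "Autre") == cat]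
--         parts.append(f"\n**{cat}** ({len(group)})")
--         parts.extend(
--             f"  • {a.get('weapon_name', 'N/A')} - {a.get('username', 'N/A')}"
--             for a in group
--         )
--     parts.append(f"\n**Total: {len(roster)} joueurs**")
--     return "\n".join(parts)
-- ===== Notes on version B (the rewrite author's own statement) =====
-- stated objective: simpler
-- what changed: B drops the group_by_category dict helper entirely: it takes the sorted set of category names and emits each group by filtering the roster per category, appending the group's lines with list.extend instead of A's dict-build-then-sorted(items()) pass.
import Mathlib
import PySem

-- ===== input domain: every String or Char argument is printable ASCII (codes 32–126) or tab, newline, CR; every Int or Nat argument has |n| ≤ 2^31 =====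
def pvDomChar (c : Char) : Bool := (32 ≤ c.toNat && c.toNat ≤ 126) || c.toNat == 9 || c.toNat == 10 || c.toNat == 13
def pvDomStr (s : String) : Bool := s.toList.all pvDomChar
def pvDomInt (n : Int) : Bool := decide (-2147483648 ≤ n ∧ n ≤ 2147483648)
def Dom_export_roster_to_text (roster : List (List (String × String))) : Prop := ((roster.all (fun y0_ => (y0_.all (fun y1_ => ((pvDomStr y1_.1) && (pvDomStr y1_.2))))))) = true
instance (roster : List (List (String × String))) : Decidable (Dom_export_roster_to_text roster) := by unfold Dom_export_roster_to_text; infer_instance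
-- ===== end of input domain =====

-- B replaces A's dict-grouping helper by "sorted set of categories, then filter per category":
-- a simpler two-pass decomposition with the same output.

-- ===== PORT A =====
-- Python dict.get(k, dflt) on an assignment record (a dict → association list)
def pvGet (a : List (String × String)) (k dflt : String) : String :=
  (PySem.Dict.mk a).getD k dflt

def group_by_category (items : List (List (String × String))) (category_field : String) :
    PySem.Dict String (List (List (String × String))) :=
  items.foldl (fun grouped item =>
    let category := pvGet item category_field "Autre"
    let grouped' := if grouped.contains category then grouped
                    else grouped.insert category ([] : List (List (String × String)))
    grouped'.modify category [] (fun l => l ++ [item]))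
    PySem.Dict.empty

def export_roster_to_text (roster : List (List (String × String))) : String :=
  if roster = [] then "Aucune assignation pour le moment."
  else
    let by_category := group_by_category roster "category"
    -- sorted(by_category.items()): the dict's keys are distinct, so Python's tuple
    -- comparison only ever reads the String key — exact as a stable sort on the key
    let sortedItems := PySem.List.sorted by_category.items (fun p => p.1) false
    let lines := sortedItems.foldl (fun lines p =>
      let lines := lines ++ ["\n**" ++ p.1 ++ "** (" ++ PySem.Int.toStr (p.2.length : Int) ++ ")"]
      p.2.foldl (fun lines assignment =>
        let weapon := pvGet assignment "weapon_name" "N/A"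
        let username := pvGet assignment "username" "N/A"
        lines ++ ["  • " ++ weapon ++ " - " ++ username]) lines)
      ["**🗡️ ROSTER ALBION ZERG 🗡️**\n"]
    let lines := lines ++ ["\n**Total: " ++ PySem.Int.toStr (roster.length : Int) ++ " joueurs**"]
    PySem.Str.join "\n" lines

-- ===== PORT B =====
def export_roster_to_text_alt (roster : List (List (String × String))) : String :=
  if roster = [] then "Aucune assignation pour le moment."
  else
    let categories := PySem.List.sorted
      (PySem.Set.ofList (roster.map (fun a => pvGet a "category" "Autre"))) (fun c => c) false
    let parts := categories.foldl (fun parts cat =>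
      let group := roster.filter (fun a => pvGet a "category" "Autre" == cat)
      (parts ++ ["\n**" ++ cat ++ "** (" ++ PySem.Int.toStr (group.length : Int) ++ ")"]) ++
        group.map (fun a => "  • " ++ pvGet a "weapon_name" "N/A" ++ " - " ++ pvGet a "username" "N/A"))
      ["**🗡️ ROSTER ALBION ZERG 🗡️**\n"]
    PySem.Str.join "\n" (parts ++ ["\n**Total: " ++ PySem.Int.toStr (roster.length : Int) ++ " joueurs**"])

-- ===== PRECONDITION & SPEC =====
def Spec_export_roster_to_text (roster : List (List (String × String))) (out : String) : Prop := out = export_roster_to_text_alt roster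
instance (roster : List (List (String × String))) (out : String) : Decidable (Spec_export_roster_to_text roster out) := by unfold Spec_export_roster_to_text; infer_instance

-- ===== CLAIM (what is proved, stated in full; the proofs are below) =====
def Claim_equal_export_roster_to_text : Prop := ∀ (roster : List (List (String × String))), Dom_export_roster_to_text roster → Spec_export_roster_to_text roster (export_roster_to_text roster)

-- ===== LEMMAS AND PROOFS =====
theorem pv_modify_eq_insert (d : PySem.Dict String (List (List (String × String))))
    (k : String) (f : List (List (String × String)) → List (List (String × String))) :
    d.modify k [] f = d.insert k (f (d.getD k [])) := rfl

theorem pv_step_eq (d : PySem.Dict String (List (List (String × String))))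
    (c : String) (x : List (String × String)) :
    (if d.contains c then d else d.insert c []).modify c [] (fun l => l ++ [x])
      = d.modify c [] (fun l => l ++ [x]) := by
  by_cases h : d.contains c = true
  · rw [if_pos h]
  · have h' : d.contains c = false := by simpa using h
    rw [if_neg h, pv_modify_eq_insert, pv_modify_eq_insert,
        PySem.Dict.getD_insert_self, PySem.Dict.insert_insert_self,
        PySem.Dict.getD_of_not_contains d [] h']

theorem pv_group_eq (roster : List (List (String × String))) :
    group_by_category roster "category"
      = roster.foldl (fun d item => d.modify (pvGet item "category" "Autre") [] (fun l => l ++ [item]))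
          PySem.Dict.empty := by
  unfold group_by_category
  congr 1
  funext d item
  exact pv_step_eq d (pvGet item "category" "Autre") item

theorem pv_getD_group (roster : List (List (String × String))) (c : String) :
    (group_by_category roster "category").getD c []
      = roster.filter (fun a => pvGet a "category" "Autre" == c) := by
  rw [pv_group_eq]
  have h := PySem.Dict.getD_foldl_modify_append
    (l := roster.map (fun a => (pvGet a "category" "Autre", a)))
    (d := PySem.Dict.empty) (c := c)
  rw [List.foldl_map] at h
  simp only [h, PySem.Dict.getD_empty, List.filter_map, List.map_map]
  simp [Function.comp_def]

theorem pv_keys_group (roster : List (List (String × String))) :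
    (group_by_category roster "category").keys
      = PySem.Set.ofList (roster.map (fun a => pvGet a "category" "Autre")) := by
  rw [pv_group_eq]
  rw [PySem.Dict.keys_foldl_modify_key]
  simp [PySem.Dict.keys_empty]
  rfl

theorem pv_nodup_keys_group (roster : List (List (String × String))) :
    (group_by_category roster "category").keys.Nodup := by
  rw [pv_group_eq]
  exact PySem.Dict.nodup_keys_foldl_modify_key _ _ _ _ _ PySem.Dict.nodup_keys_empty

theorem pv_sorted_items (roster : List (List (String × String))) :
    PySem.List.sorted (group_by_category roster "category").items (fun p => p.1) false
      = (PySem.List.sorted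
            (PySem.Set.ofList (roster.map (fun a => pvGet a "category" "Autre"))) (fun c => c) false).map
          (fun c => (c, roster.filter (fun a => pvGet a "category" "Autre" == c))) := by
  apply PySem.List.sorted_eq_of_perm_of_pairwise_lt
  · have hitems : (group_by_category roster "category").items
        = ((group_by_category roster "category").keys).map
            (fun k => (k, (group_by_category roster "category").getD k [])) :=
      PySem.Dict.items_eq_map_keys _ (pv_nodup_keys_group roster) []
    rw [hitems, pv_keys_group]
    have hperm := PySem.List.sorted_perm
      (xs := PySem.Set.ofList (roster.map (fun a => pvGet a "category" "Autre")))
      (key := fun c => c) (rev := false)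
    have := hperm.map (fun c => (c, roster.filter (fun a => pvGet a "category" "Autre" == c)))
    refine this.trans ?_
    apply List.Perm.of_eq
    apply List.map_congr_left
    intro c _
    rw [pv_getD_group]
  · rw [List.pairwise_map]
    exact PySem.List.sorted_ofList_pairwise_lt (xs := roster.map (fun a => pvGet a "category" "Autre"))

-- ===== VERDICT (by name: the statement is the Claim_ definition above) =====
theorem export_roster_to_text_spec : Claim_equal_export_roster_to_text := by
  intro roster _
  unfold Spec_export_roster_to_text export_roster_to_text export_roster_to_text_alt
  by_cases h : roster = []
  · simp [h]
  · simp only [h, if_neg, not_false_iff]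
    rw [pv_sorted_items, List.foldl_map]
    simp only [PySem.List.foldl_append_singleton_eq_map, List.append_assoc]
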